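-- pv_equiv track=rewrite | github.com/AgoCodeBro/bookbot | main.py | sortedKeys
-- ===== SOURCE A (Python) =====
-- def findCharFrequency(text):
--
--     text = text.lower()
--     charCount = {}
--     for char in text:
--
--         if char in charCount:
--
--             charCount[char] += 1
--
--         else:
--
--             charCount[char] = 1
--
--     return charCount
--
-- def sortedKeys(text):
--
--     keys = []
--     charCount = findCharFrequency(text)
--
--     for key in charCount:
--
--         if key.isalpha():
--
--             keys.append(key)
--
--     keys.sort()
--
--     return keys
-- ===== SOURCE B (Python) =====
-- def sortedKeys(text):
--     low = text.lower()
--     return [c for c in "abcdefghijklmnopqrstuvwxyz" if c in low]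
-- ===== Notes on version B (the rewrite author's own statement) =====
-- stated objective: faster
-- what changed: B drops A's frequency-count dictionary, key-filter loop and sort entirely: it scans the 26 lowercase ASCII letters in order and keeps each one that occurs in text.lower(), so the output is produced already sorted by a fixed number of substring-membership tests (exact on the ASCII input domain the claim covers).
import Mathlib
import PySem

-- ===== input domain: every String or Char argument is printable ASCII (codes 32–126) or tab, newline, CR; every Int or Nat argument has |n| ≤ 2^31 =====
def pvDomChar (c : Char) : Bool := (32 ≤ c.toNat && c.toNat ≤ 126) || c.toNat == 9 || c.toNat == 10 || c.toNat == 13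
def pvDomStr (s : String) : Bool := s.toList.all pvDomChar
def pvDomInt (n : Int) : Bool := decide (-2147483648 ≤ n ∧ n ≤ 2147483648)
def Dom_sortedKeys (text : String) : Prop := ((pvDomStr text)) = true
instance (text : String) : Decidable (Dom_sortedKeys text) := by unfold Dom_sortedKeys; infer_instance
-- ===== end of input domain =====

-- B replaces A's count-dict + key-filter loop + sort by a single in-order scan of the
-- fixed alphabet 'a'..'z', keeping each letter that occurs in text.lower(); the result
-- comes out already sorted, so no sort is needed (exact on the ASCII domain the claim covers).

-- ===== PORT A =====
-- helper: findCharFrequency — counts occurrences of each character (as a 1-char string,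
-- as Python 'for char in text' yields) of text.lower(), insertion-ordered dict
def findCharFrequency (text : String) : PySem.Dict String Int :=
  ((PySem.Str.lower text).toList.map (fun c => String.ofList [c])).foldl
    (fun d ch => if d.contains ch then d.insert ch (d.getD ch 0 + 1) else d.insert ch 1)
    PySem.Dict.empty

def sortedKeys (text : String) : List String :=
  let charCount := findCharFrequency text
  let keys := charCount.keys.foldl
    (fun ks k => if PySem.Str.strIsalpha k then ks ++ [k] else ks) []
  PySem.List.sorted keys (fun x => x)

-- ===== PORT B =====
-- low = text.lower(); [c for c in "abcdefghijklmnopqrstuvwxyz" if c in low]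
def sortedKeys_alt (text : String) : List String :=
  let low := PySem.Str.lower text
  ("abcdefghijklmnopqrstuvwxyz".toList.filter
      (fun c => PySem.Str.isIn (String.ofList [c]) low)).map
    (fun c => String.ofList [c])

-- ===== PRECONDITION & SPEC =====
def Spec_sortedKeys (text : String) (out : List String) : Prop := out = sortedKeys_alt text
instance (text : String) (out : List String) : Decidable (Spec_sortedKeys text out) := by unfold Spec_sortedKeys; infer_instance

-- ===== CLAIM (what is proved, stated in full; the proofs are below) =====
def Claim_equal_sortedKeys : Prop := ∀ (text : String), Dom_sortedKeys text → Spec_sortedKeys text (sortedKeys text)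

-- ===== LEMMAS AND PROOFS =====

-- A's counting loop, with the insert pulled out of the branch (the two step functions agree)
theorem findCharFrequency_keys (text : String) :
    (findCharFrequency text).keys =
      PySem.Set.ofList ((PySem.Str.lower text).toList.map (fun c => String.ofList [c])) := by
  unfold findCharFrequency
  have hstep : (fun (d : PySem.Dict String Int) ch =>
      if d.contains ch then d.insert ch (d.getD ch 0 + 1) else d.insert ch 1) =
      (fun (d : PySem.Dict String Int) ch =>
        d.insert ch (if d.contains ch then d.getD ch 0 + 1 else 1)) := by
    funext d ch
    exact (apply_ite (d.insert ch) (d.contains ch) (d.getD ch 0 + 1) 1).symm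
  rw [hstep, PySem.Dict.keys_foldl_insert, PySem.Dict.keys_empty]
  exact PySem.Set.update_empty _

-- comparison of one-character Python strings is comparison of the characters
theorem single_lt_single (a b : Char) :
    (String.ofList [a] < String.ofList [b]) ↔ a < b := by
  simp only [String.lt_iff_toList_lt, String.toList_ofList]
  constructor
  · intro h; cases h with
    | rel h => exact h
    | cons h => cases h
  · exact fun h => List.Lex.rel h

theorem single_injective : Function.Injective (fun c : Char => String.ofList [c]) := by
  intro a b h
  simpa using congrArg String.toList h

-- a one-character substring test is character membership
theorem single_isIn_iff (c : Char) (s : String) :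
    PySem.Str.isIn (String.ofList [c]) s = true ↔ c ∈ s.toList := by
  rw [PySem.Str.isIn_iff_infix]
  simp only [String.toList_ofList]
  constructor
  · exact fun h => h.subset (by simp)
  · intro h
    obtain ⟨l, r, hs⟩ := List.append_of_mem h
    exact ⟨l, r, by rw [hs]; simp⟩

-- on the ASCII domain, a lowered character is alphabetic exactly when it is one of 'a'..'z'
set_option maxRecDepth 8192 in
theorem dom_lower_alpha_iff (c : Char) (h : pvDomChar c = true) :
    PySem.Chars.isalpha (PySem.Chars.lowerChar c) = true ↔
      PySem.Chars.lowerChar c ∈ "abcdefghijklmnopqrstuvwxyz".toList := by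
  have hball : ∀ n, n < 127 → pvDomChar (Char.ofNat n) = true →
      (PySem.Chars.isalpha (PySem.Chars.lowerChar (Char.ofNat n)) = true ↔
        PySem.Chars.lowerChar (Char.ofNat n) ∈ "abcdefghijklmnopqrstuvwxyz".toList) := by
    decide
  have hlt : c.toNat < 127 := by
    simp only [pvDomChar, Bool.or_eq_true, Bool.and_eq_true, decide_eq_true_eq,
      beq_iff_eq] at h
    omega
  have := hball c.toNat hlt (by rwa [Char.ofNat_toNat])
  rwa [Char.ofNat_toNat] at this

theorem alpha_pairwise :
    List.Pairwise (· < ·) "abcdefghijklmnopqrstuvwxyz".toList := by decide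

theorem sortedKeys_spec : Claim_equal_sortedKeys := by
  intro text hdom
  simp only [Spec_sortedKeys, sortedKeys, sortedKeys_alt]
  have hfold : ((findCharFrequency text).keys.foldl
      (fun ks k => if PySem.Str.strIsalpha k then ks ++ [k] else ks) []) =
      (findCharFrequency text).keys.filter (fun k => PySem.Str.strIsalpha k) := by
    have := PySem.List.foldl_append_if (fun k => PySem.Str.strIsalpha k) (fun k => k)
      (findCharFrequency text).keys []
    simpa using this
  rw [hfold, findCharFrequency_keys]
  -- every character of text.lower() is lowerChar of a domain character
  have hdomL : ∀ c ∈ (PySem.Str.lower text).toList,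
      ∃ c0, pvDomChar c0 = true ∧ c = PySem.Chars.lowerChar c0 := by
    intro c hc
    rw [PySem.Str.toList_lower] at hc
    obtain ⟨c0, hc0, rfl⟩ := List.mem_map.mp hc
    exact ⟨c0, by
      have := (List.all_eq_true.mp hdom) c0 hc0
      simpa using this, rfl⟩
  -- alpha test on the one-character strings of text.lower()
  have halpha : ∀ c ∈ (PySem.Str.lower text).toList,
      (PySem.Str.strIsalpha (String.ofList [c]) = true ↔
        c ∈ "abcdefghijklmnopqrstuvwxyz".toList) := by
    intro c hc
    obtain ⟨c0, hd, rfl⟩ := hdomL c hc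
    have hsi : ∀ x : Char, PySem.Str.strIsalpha (String.ofList [x]) =
        PySem.Chars.isalpha x := fun x => by simp [PySem.Chars.strIsalpha]
    rw [hsi]
    exact dom_lower_alpha_iff c0 hd
  apply PySem.List.sorted_eq_of_perm_of_pairwise_lt
  · -- permutation: same (distinct) elements
    refine (List.perm_ext_iff_of_nodup ?_ ?_).mpr ?_
    · exact List.Nodup.map single_injective
        (List.Nodup.filter _ (alpha_pairwise.imp ne_of_lt))
    · exact (PySem.Set.nodup_ofList _).filter _
    · intro s
      simp only [List.mem_map, List.mem_filter, PySem.Set.mem_ofList]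
      constructor
      · rintro ⟨c, ⟨hca, hin⟩, rfl⟩
        have hcl : c ∈ (PySem.Str.lower text).toList := (single_isIn_iff c _).mp hin
        exact ⟨⟨c, hcl, rfl⟩, (halpha c hcl).mpr hca⟩
      · rintro ⟨hmem, hps⟩
        obtain ⟨c, hcl, rfl⟩ := hmem
        exact ⟨c, ⟨(halpha c hcl).mp hps, (single_isIn_iff c _).mpr hcl⟩, rfl⟩
  · -- the alphabet scan produces a strictly increasing list of strings
    refine List.pairwise_map.mpr ?_
    exact (alpha_pairwise.filter _).imp (fun h => (single_lt_single _ _).mpr h)
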